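-- pv_equiv track=rewrite | github.com/eeeeegor/Personal-expense-manager | interface.py | check_month_year_format
-- ===== SOURCE A (Python) =====
-- def check_month_year_format(date):
--     if len(date) != 7:
--         return False
--     for i in range(len(date)):
--         if i == 4 and date[i] != '-':
--             return False
--         elif i != 4 and date[i] not in '0123456789':
--             return False
--     return True
-- ===== SOURCE B (Python) =====
-- def check_month_year_format(date):
--     year, sep, month = date[:4], date[4:5], date[5:]
--     if sep != '-' or len(year) != 4 or len(month) != 2:
--         return False
--     return all(c in '0123456789' for c in year + month)
-- ===== Notes on version B (the rewrite author's own statement) =====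
-- stated objective: simpler
-- what changed: Replaced the index loop with its i==4 special case by a field decomposition: slice into year/separator/month, check field lengths and the separator once, then an all() digit check over the two fields.
import Mathlib
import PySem

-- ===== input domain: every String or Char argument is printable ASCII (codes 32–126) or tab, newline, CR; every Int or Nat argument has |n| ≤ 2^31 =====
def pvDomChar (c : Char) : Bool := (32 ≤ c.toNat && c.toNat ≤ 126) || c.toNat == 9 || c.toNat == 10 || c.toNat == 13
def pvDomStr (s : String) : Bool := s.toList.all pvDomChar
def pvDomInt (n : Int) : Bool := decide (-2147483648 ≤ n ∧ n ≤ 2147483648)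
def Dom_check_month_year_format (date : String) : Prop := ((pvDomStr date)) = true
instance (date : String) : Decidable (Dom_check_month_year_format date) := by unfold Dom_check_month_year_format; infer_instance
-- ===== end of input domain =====

-- B replaces A's index loop (with its i==4 special case) by a field decomposition:
-- slice year/separator/month, check field lengths and the separator, then one digit check. (objective: simpler)

-- ===== PORT A =====
-- the indexed for-loop of A: early-return on a bad char, index carried along
def pvALoop : List Char → Nat → Bool
  | [], _ => true
  | c :: rest, i =>
    if i == 4 && !(c == '-') then false
    else if !(i == 4) && !(("0123456789".toList).contains c) then false
    else pvALoop rest (i + 1)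

def check_month_year_format (date : String) : Bool :=
  if date.toList.length ≠ 7 then false
  else pvALoop date.toList 0

-- ===== PORT B =====
def check_month_year_format_alt (date : String) : Bool :=
  let cs := date.toList
  let year := PySem.List.slice cs none (some 4)
  let sep := PySem.List.slice cs (some 4) (some 5)
  let month := PySem.List.slice cs (some 5) none
  if !(sep == ['-']) || year.length ≠ 4 || month.length ≠ 2 then false
  else (year ++ month).all (fun c => ("0123456789".toList).contains c)

-- ===== PRECONDITION & SPEC =====
def Spec_check_month_year_format (date : String) (out : Bool) : Prop := out = check_month_year_format_alt date
instance (date : String) (out : Bool) : Decidable (Spec_check_month_year_format date out) := by unfold Spec_check_month_year_format; infer_instance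

-- ===== CLAIM (what is proved, stated in full; the proofs are below) =====
def Claim_equal_check_month_year_format : Prop := ∀ (date : String), Dom_check_month_year_format date → Spec_check_month_year_format date (check_month_year_format date)

-- ===== LEMMAS AND PROOFS =====

theorem check_month_year_format_eq (date : String) :
    check_month_year_format date = check_month_year_format_alt date := by
  unfold check_month_year_format check_month_year_format_alt
  set cs := date.toList with hcs
  clear_value cs
  clear hcs
  by_cases h7 : cs.length = 7
  · -- exactly seven characters: decompose the list into its fields
    match cs, h7 with
    | [a, b, c, d, e, f, g], _ =>
      have hy : PySem.List.slice [a,b,c,d,e,f,g] none (some 4) = [a,b,c,d] := rfl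
      have hs : PySem.List.slice [a,b,c,d,e,f,g] (some 4) (some 5) = [e] := rfl
      have hm : PySem.List.slice [a,b,c,d,e,f,g] (some 5) none = [f,g] := rfl
      simp only [hy, hs, hm, pvALoop, List.length_cons, List.length_nil, List.cons_append,
        List.nil_append, List.all_cons, List.all_nil, Nat.reduceBEq, Nat.reduceAdd,
        Bool.not_false, Bool.true_and, Bool.false_and, Bool.and_true]
      norm_num
      generalize decide (a ∈ "0123456789".toList) = pa
      generalize decide (b ∈ "0123456789".toList) = pb
      generalize decide (c ∈ "0123456789".toList) = pc
      generalize decide (d ∈ "0123456789".toList) = pd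
      generalize decide (f ∈ "0123456789".toList) = pf
      generalize decide (g ∈ "0123456789".toList) = pg
      generalize decide (e = '-') = pe
      cases pa <;> cases pb <;> cases pc <;> cases pd <;> cases pe <;> cases pf <;> cases pg <;>
        rfl
  · -- length ≠ 7: A fails the length guard, B fails the month-length check
    have hmth : (PySem.List.slice cs (some 5) none).length ≠ 2 := by
      have h5 : PySem.List.slice cs (some 5) none = cs.drop 5 := by
        have h := PySem.List.slice_from_natCast (xs := cs) (a := 5)
        norm_num at h
        exact h
      rw [h5]
      simp only [List.length_drop]
      omega
    simp [h7, hmth]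

-- ===== VERDICT (by name: the statement is the Claim_ definition above) =====
theorem check_month_year_format_spec : Claim_equal_check_month_year_format := by
  intro date _
  unfold Spec_check_month_year_format
  exact check_month_year_format_eq date
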